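-- pv_equiv track=rewrite | github.com/nikuframedia-svg/Moldit- | apps/backend/src/domain/scheduling/transform.py | extract_stock_from_raw_np
-- ===== SOURCE A (Python) =====
-- def extract_stock_from_raw_np(daily: list[int | None]) -> int:
--     """Extract initial stock = last positive NP before the first negative."""
--     last_positive = 0
--     for v in daily:
--         if v is None:
--             continue
--         if v < 0:
--             break
--         last_positive = v
--     return last_positive
-- ===== SOURCE B (Python) =====
-- def extract_stock_from_raw_np(daily):
--     """Two-pass: locate the cut at the first negative entry, then scan
--     backwards from the cut for the first non-None value."""
--     cut = len(daily)
--     for i, v in enumerate(daily):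
--         if v is not None and v < 0:
--             cut = i
--             break
--     for i in range(cut - 1, -1, -1):
--         if daily[i] is not None:
--             return daily[i]
--     return 0
-- ===== Notes on version B (the rewrite author's own statement) =====
-- stated objective: alternative
-- what changed: Replaced the single forward accumulator loop with two index-based passes: a forward pass that only finds the cut index of the first negative entry, then a backward scan from the cut that returns the first non-None element (0 if none), so no running last_positive value is maintained.
import Mathlib
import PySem

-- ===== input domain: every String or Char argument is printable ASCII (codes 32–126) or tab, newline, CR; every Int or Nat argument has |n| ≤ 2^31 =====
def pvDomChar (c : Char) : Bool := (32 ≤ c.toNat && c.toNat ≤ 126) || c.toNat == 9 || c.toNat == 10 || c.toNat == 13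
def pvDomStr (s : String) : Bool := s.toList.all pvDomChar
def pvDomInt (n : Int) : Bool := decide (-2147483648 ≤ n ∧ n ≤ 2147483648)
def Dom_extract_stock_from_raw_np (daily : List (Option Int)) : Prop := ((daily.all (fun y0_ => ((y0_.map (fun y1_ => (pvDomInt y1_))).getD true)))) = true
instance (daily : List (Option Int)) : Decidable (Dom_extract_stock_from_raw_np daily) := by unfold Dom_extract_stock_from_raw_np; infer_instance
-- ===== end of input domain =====

-- B replaces A's forward accumulator loop with two index passes: find the cut at the
-- first negative, then scan backwards from the cut for the first non-None (objective: alternative).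

-- ===== PORT A =====
-- A's for-loop with `continue`/`break` and the running `last_positive` accumulator
def extract_stock_loopA : List (Option Int) → Int → Int
  | [], acc => acc
  | none :: t, acc => extract_stock_loopA t acc            -- continue
  | some v :: t, acc => if v < 0 then acc                  -- break
                        else extract_stock_loopA t v       -- last_positive = v

def extract_stock_from_raw_np (daily : List (Option Int)) : Int :=
  extract_stock_loopA daily 0

-- ===== PORT B =====
-- first pass of Source B: index of the first negative entry, len(daily) if none (break ↦ 0 here)
def extract_stock_cutB : List (Option Int) → Nat
  | [] => 0
  | none :: t => extract_stock_cutB t + 1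
  | some v :: t => if v < 0 then 0 else extract_stock_cutB t + 1

-- second pass of Source B: `for i in range(cut-1, -1, -1): if daily[i] is not None: return daily[i]`;
-- daily[i]? is exact since every visited index satisfies i < cut ≤ len(daily)
def extract_stock_backB (daily : List (Option Int)) : Nat → Int
  | 0 => 0
  | i + 1 => match daily[i]? with
             | some (some v) => v
             | _ => extract_stock_backB daily i

def extract_stock_from_raw_np_alt (daily : List (Option Int)) : Int :=
  extract_stock_backB daily (extract_stock_cutB daily)

-- ===== PRECONDITION & SPEC =====
def Spec_extract_stock_from_raw_np (daily : List (Option Int)) (out : Int) : Prop := out = extract_stock_from_raw_np_alt daily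
instance (daily : List (Option Int)) (out : Int) : Decidable (Spec_extract_stock_from_raw_np daily out) := by unfold Spec_extract_stock_from_raw_np; infer_instance

-- ===== CLAIM (what is proved, stated in full; the proofs are below) =====
def Claim_equal_extract_stock_from_raw_np : Prop := ∀ (daily : List (Option Int)), Dom_extract_stock_from_raw_np daily → Spec_extract_stock_from_raw_np daily (extract_stock_from_raw_np daily)

-- ===== LEMMAS AND PROOFS =====

theorem getLast?_getD_cons (v : Int) (l : List Int) (acc : Int) :
    ((v :: l).getLast?).getD acc = (l.getLast?).getD v := by
  cases l with
  | nil => rfl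
  | cons h t =>
    rw [List.getLast?_cons_cons]
    cases hx : (h :: t).getLast? with
    | none => simp at hx
    | some x => simp

-- A's loop computes the last non-None value of the prefix before the first negative
theorem extract_stock_loopA_eq (daily : List (Option Int)) (acc : Int) :
    extract_stock_loopA daily acc =
      (((daily.take (extract_stock_cutB daily)).filterMap id).getLast?).getD acc := by
  induction daily generalizing acc with
  | nil => rfl
  | cons h t ih =>
    cases h with
    | none =>
      simpa [extract_stock_loopA, extract_stock_cutB, List.take_succ_cons] using ih acc
    | some v =>
      by_cases hv : v < 0
      · simp [extract_stock_loopA, extract_stock_cutB, hv]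
      · simp only [extract_stock_loopA, if_neg hv, extract_stock_cutB, List.take_succ_cons,
          List.filterMap_cons, id]
        rw [ih v, getLast?_getD_cons]
        simp

-- B's backward scan computes the same quantity for any cut index
theorem extract_stock_backB_eq (daily : List (Option Int)) (n : Nat) :
    extract_stock_backB daily n =
      (((daily.take n).filterMap id).getLast?).getD 0 := by
  induction n with
  | zero => rfl
  | succ i ih =>
    rw [List.take_add_one]
    cases hx : daily[i]? with
    | none => simp [extract_stock_backB, hx, ih]
    | some o =>
      cases o with
      | none => simp [extract_stock_backB, hx, ih]
      | some v =>
        simp [extract_stock_backB, hx, List.filterMap_append, List.getLast?_append]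

-- ===== VERDICT (by name: the statement is the Claim_ definition above) =====
theorem extract_stock_from_raw_np_spec : Claim_equal_extract_stock_from_raw_np := by
  intro daily _
  unfold Spec_extract_stock_from_raw_np extract_stock_from_raw_np extract_stock_from_raw_np_alt
  rw [extract_stock_loopA_eq, extract_stock_backB_eq]
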